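-- pv_equiv track=rewrite | github.com/Vencislav-Dzhukelov/101-3 | week1/day3.py | group_help
-- ===== SOURCE A (Python) =====
-- def group_help(lst):
--     first_item = lst[0]
--     result = [first_item]
--     for i in range(1, len(lst)):
--         if lst[i] == first_item:
--             result.append(lst[i])
--         else:
--             break
--     return result
-- ===== SOURCE B (Python) =====
-- def group_help(lst):
--     first = lst[0]
--     # position of the first element differing from first = length of the leading run
--     n = next((i for i, x in enumerate(lst) if x != first), len(lst))
--     return [first] * n
-- ===== Notes on version B (the rewrite author's own statement) =====
-- stated objective: alternative
-- what changed: B reduces the task to a search-then-build: it finds the index of the first element differing from the first element (default the list length) and returns that many replicas of the first element, instead of A's index loop that appends each scanned element and breaks.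
import Mathlib
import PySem

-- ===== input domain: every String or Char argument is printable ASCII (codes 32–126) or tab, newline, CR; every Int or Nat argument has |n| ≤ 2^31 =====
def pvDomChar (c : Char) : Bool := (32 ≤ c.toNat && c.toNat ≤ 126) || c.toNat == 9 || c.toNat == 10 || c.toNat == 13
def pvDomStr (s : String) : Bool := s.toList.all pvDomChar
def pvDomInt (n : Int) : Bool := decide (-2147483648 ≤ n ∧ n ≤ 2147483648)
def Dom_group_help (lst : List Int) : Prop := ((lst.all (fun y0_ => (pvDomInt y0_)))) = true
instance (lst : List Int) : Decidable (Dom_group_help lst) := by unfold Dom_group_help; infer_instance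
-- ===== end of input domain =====

-- B finds the index of the first element differing from the first element and replicates the first element that many times, instead of A's append-and-break index loop (alternative decomposition); both raise IndexError on [] (excluded by Pre_).


-- ===== PORT A =====
-- loop 'for i in range(1, len(lst)): … break' as structural recursion on the index
def groupHelpLoopA (lst : List Int) (first : Int) (i : Nat) (result : List Int) : List Int :=
  if h : i < lst.length then
    if lst[i] == first then
      groupHelpLoopA lst first (i + 1) (result ++ [lst[i]])
    else result
  else result
termination_by lst.length - i

def group_help (lst : List Int) : List Int :=
  match PySem.List.pyGet? lst 0 with
  | none => []   -- unreachable: Pre_ excludes the empty list (IndexError)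
  | some first_item => groupHelpLoopA lst first_item 1 [first_item]

-- ===== PORT B =====
-- 'next((i for i, x in enumerate(lst) if x != first), len(lst))': index of the first mismatch, default length
def groupHelpMismatchIdx (first : Int) : List Int → Nat
  | [] => 0
  | x :: rest => if x != first then 0 else 1 + groupHelpMismatchIdx first rest

-- access the first element (IndexError on empty), then replicate it mismatch-index times
def group_help_alt (lst : List Int) : List Int :=
  match PySem.List.pyGet? lst 0 with
  | none => []   -- unreachable: Pre_ excludes the empty list (IndexError)
  | some first => List.replicate (groupHelpMismatchIdx first lst) first

-- ===== PRECONDITION & SPEC =====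
-- A raises IndexError on the empty list (first-element access); so does B.
def Pre_group_help (lst : List Int) : Prop := lst ≠ []
instance (lst : List Int) : Decidable (Pre_group_help lst) := by unfold Pre_group_help; infer_instance
def pvWitness_group_help : List Int := [1, 1, 2]

def Spec_group_help (lst : List Int) (out : List Int) : Prop := out = group_help_alt lst
instance (lst : List Int) (out : List Int) : Decidable (Spec_group_help lst out) := by unfold Spec_group_help; infer_instance

-- ===== CLAIM (what is proved, stated in full; the proofs are below) =====
def Claim_equal_group_help : Prop := ∀ (lst : List Int), Dom_group_help lst → Pre_group_help lst → Spec_group_help lst (group_help lst)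

-- ===== LEMMAS AND PROOFS =====
-- loop invariant of A: from index i the loop appends exactly the leading run of 'first' in lst.drop i
theorem groupHelpLoopA_eq (lst : List Int) (first : Int) (i : Nat) (result : List Int) :
    groupHelpLoopA lst first i result = result ++ (lst.drop i).takeWhile (· == first) := by
  fun_induction groupHelpLoopA lst first i result with
  | case1 i result h heq ih =>
    have hdrop : lst.drop i = lst[i] :: lst.drop (i + 1) := List.drop_eq_getElem_cons h
    rw [ih, hdrop]
    simp [List.takeWhile, heq]
  | case2 i result h hne =>
    have hdrop : lst.drop i = lst[i] :: lst.drop (i + 1) := List.drop_eq_getElem_cons h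
    rw [hdrop]
    simp [List.takeWhile, hne]
  | case3 i result h =>
    have : lst.drop i = [] := List.drop_eq_nil_of_le (Nat.le_of_not_lt h)
    simp [this]

-- replicating 'first' mismatch-index times reproduces the leading run itself (its elements all equal 'first')
theorem replicate_runLen_eq_takeWhile (first : Int) (l : List Int) :
    List.replicate (groupHelpMismatchIdx first l) first = l.takeWhile (· == first) := by
  induction l with
  | nil => simp [groupHelpMismatchIdx]
  | cons x rest ih =>
    by_cases hx : x = first
    · subst hx
      simp [groupHelpMismatchIdx, List.takeWhile, List.replicate_succ, Nat.add_comm, ih]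
    · have hb : (x == first) = false := beq_eq_false_iff_ne.mpr hx
      simp [groupHelpMismatchIdx, List.takeWhile, hb]
      exact hx

-- ===== VERDICT (by name: the statement is the Claim_ definition above) =====
theorem group_help_spec : Claim_equal_group_help := by
  intro lst _ hpre
  obtain ⟨x, xs, rfl⟩ := List.exists_cons_of_ne_nil hpre
  show group_help (x :: xs) = group_help_alt (x :: xs)
  simp only [group_help, group_help_alt, PySem.List.pyGet?, PySem.List.pyIdx?]
  norm_num
  rw [groupHelpLoopA_eq, replicate_runLen_eq_takeWhile]
  simp [List.takeWhile]
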